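-- pv_equiv track=rewrite | github.com/KazukiNoSuzaku/Leetcode | Python/1525_Number_of_Good_Ways_to_Split_a_String.py | numSplits
-- ===== SOURCE A (Python) =====
-- def numSplits(s):
--     """
--     :type s: str
--     :rtype: int
--     """
--     from collections import Counter
--     right = Counter(s)
--     left = set()
--     result = 0
--
--     for c in s:
--         left.add(c)
--         right[c] -= 1
--         if right[c] == 0:
--             del right[c]
--         if len(left) == len(right):
--             result += 1
--
--     return result
-- ===== SOURCE B (Python) =====
-- def numSplits(s):
--     pre = []
--     seen = set()
--     for c in s:
--         seen.add(c)
--         pre.append(len(seen))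
--     suf_rev = []
--     seen = set()
--     for c in reversed(s):
--         seen.add(c)
--         suf_rev.append(len(seen))
--     suf = suf_rev[::-1] + [0]
--     return sum(1 for a, b in zip(pre, suf[1:]) if a == b)
-- ===== Notes on version B (the rewrite author's own statement) =====
-- stated objective: alternative
-- what changed: A makes one incremental pass maintaining a left set and a decremented Counter of the remainder; B first builds a prefix distinct-count table and a suffix distinct-count table by two independent scans and then counts split points where the tables agree.
import Mathlib
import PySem

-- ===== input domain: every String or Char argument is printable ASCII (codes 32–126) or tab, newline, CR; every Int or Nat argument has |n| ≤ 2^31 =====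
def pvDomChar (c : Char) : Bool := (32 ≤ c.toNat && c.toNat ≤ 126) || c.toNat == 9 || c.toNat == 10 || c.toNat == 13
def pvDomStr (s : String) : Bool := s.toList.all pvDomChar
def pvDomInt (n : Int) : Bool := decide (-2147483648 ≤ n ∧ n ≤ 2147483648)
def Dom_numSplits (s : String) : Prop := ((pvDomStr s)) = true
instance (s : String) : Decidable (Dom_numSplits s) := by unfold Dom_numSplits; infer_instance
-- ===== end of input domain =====

-- B replaces A's single incremental pass (set + decremented Counter) by two table-building
-- scans (prefix and suffix distinct-count tables) plus one comparison pass; objective: alternative.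

-- ===== PORT A =====
-- one iteration of A's loop body over state (right counter, left set, result)
def numSplitsStep (st : PySem.Dict Char Int × PySem.Set Char × Int) (c : Char) :
    PySem.Dict Char Int × PySem.Set Char × Int :=
  let left := PySem.Set.add st.2.1 c
  let right := st.1.modify c 0 (· - 1)
  let right := if right.getD c 0 = 0 then right.erase c else right
  let result := if PySem.Set.len left = (right.size : Int) then st.2.2 + 1 else st.2.2
  (right, left, result)

def numSplits (s : String) : Int :=
  (s.toList.foldl numSplitsStep (PySem.Dict.counter s.toList, PySem.Set.empty, 0)).2.2

-- ===== PORT B =====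
-- the two scan loops of Source B: growing set, appending len(seen) at each step
def scanDistinct (l : List Char) : List Int :=
  (l.foldl (fun (p : PySem.Set Char × List Int) c =>
      let seen := PySem.Set.add p.1 c
      (seen, p.2 ++ [PySem.Set.len seen])) (PySem.Set.empty, [])).2

def numSplits_alt (s : String) : Int :=
  let pre := scanDistinct s.toList
  let suf := (scanDistinct s.toList.reverse).reverse ++ [(0 : Int)]
  ((pre.zip (PySem.List.slice suf (some 1) none)).countP (fun p => p.1 == p.2) : Int)

-- ===== PRECONDITION & SPEC =====
def Spec_numSplits (s : String) (out : Int) : Prop := out = numSplits_alt s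
instance (s : String) (out : Int) : Decidable (Spec_numSplits s out) := by unfold Spec_numSplits; infer_instance

-- ===== CLAIM (what is proved, stated in full; the proofs are below) =====
def Claim_equal_numSplits : Prop := ∀ (s : String), Dom_numSplits s → Spec_numSplits s (numSplits s)

-- ===== LEMMAS AND PROOFS =====

-- two Nodup lists with the same members have equal length
theorem pv_len_congr {a b : List Char} (ha : a.Nodup) (hb : b.Nodup)
    (h : ∀ x, x ∈ a ↔ x ∈ b) : a.length = b.length :=
  ((List.perm_ext_iff_of_nodup ha hb).mpr h).length_eq

theorem pv_size_eq (d : PySem.Dict Char Int) : d.size = d.keys.length := by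
  simp [PySem.Dict.size, PySem.Dict.keys]

-- lookup in an erased dict
theorem pv_get?_erase_self (d : PySem.Dict Char Int) (k : Char) :
    (d.erase k).get? k = none := by
  simp only [PySem.Dict.get?, PySem.Dict.erase, Option.map_eq_none_iff, List.find?_eq_none,
    List.mem_filter]
  intro p hp
  simp_all

theorem pv_get?_erase_ne (d : PySem.Dict Char Int) (k x : Char) (h : x ≠ k) :
    (d.erase k).get? x = d.get? x := by
  obtain ⟨items⟩ := d
  simp only [PySem.Dict.get?, PySem.Dict.erase]
  induction items with
  | nil => rfl
  | cons p t ih =>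
      by_cases hpk : p.1 = k
      · have h1 : (p.1 == x) = false := by simp [hpk, Ne.symm h]
        have h2 : (!(p.1 == k)) = false := by simp [hpk]
        simp only [List.filter_cons, h2, Bool.false_eq_true, if_false, List.find?_cons, h1]
        exact ih
      · have h2 : (!(p.1 == k)) = true := by simp [hpk]
        simp only [List.filter_cons, h2, if_true, List.find?_cons]
        cases hpe : (p.1 == x)
        · simpa using ih
        · simp

theorem pv_keys_erase (d : PySem.Dict Char Int) (k : Char) :
    (d.erase k).keys = d.keys.filter (fun x => !(x == k)) := by
  simp [PySem.Dict.keys, PySem.Dict.erase, List.filter_map, Function.comp_def]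

-- characterisation of B's scan loop
theorem pv_scan (l : List Char) (s0 : PySem.Set Char) (a0 : List Int) :
    (l.foldl (fun (p : PySem.Set Char × List Int) c =>
        let seen := PySem.Set.add p.1 c
        (seen, p.2 ++ [PySem.Set.len seen])) (s0, a0)).2
      = a0 ++ (List.range l.length).map
          (fun i => ((PySem.Set.update s0 (l.take (i+1))).length : Int)) := by
  induction l generalizing s0 a0 with
  | nil => simp
  | cons c t ih =>
      simp only [List.foldl_cons]
      rw [ih]
      simp only [List.length_cons]
      rw [List.range_succ_eq_map]
      simp [List.map_map, Function.comp_def, PySem.Set.update_cons, PySem.Set.update_nil,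
        PySem.Set.len, Nat.succ_eq_add_one, List.take_succ_cons]

theorem scanDistinct_eq (l : List Char) :
    scanDistinct l = (List.range l.length).map
      (fun i => ((PySem.Set.ofList (l.take (i+1))).length : Int)) := by
  unfold scanDistinct
  rw [pv_scan]
  simp [PySem.Set.update_nil_left]

-- invariant characterisation of A's loop
theorem pv_afold (r : List Char) (d : PySem.Dict Char Int) (left : PySem.Set Char) (res : Int)
    (hnd : d.keys.Nodup) (hmem : ∀ x, x ∈ d.keys ↔ x ∈ r)
    (hval : ∀ x, d.getD x 0 = (r.count x : Int)) :
    (r.foldl numSplitsStep (d, left, res)).2.2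
      = res + ((List.range r.length).map (fun i =>
          if ((PySem.Set.update left (r.take (i+1))).length : Int)
              = ((PySem.Set.ofList (r.drop (i+1))).length : Int) then (1:Int) else 0)).sum := by
  induction r generalizing d left res with
  | nil => simp
  | cons c t ih =>
      have hc : c ∈ d.keys := (hmem c).2 (by simp)
      have hcont : d.contains c = true := (PySem.Dict.contains_iff_mem_keys d c).mpr hc
      have hkeys1 : (d.modify c 0 (· - 1)).keys = d.keys := by
        rw [PySem.Dict.keys_modify, PySem.Dict.keys_insert_of_contains _ _ hcont]
      have hval1 : ∀ x, (d.modify c 0 (· - 1)).getD x 0 = (t.count x : Int) := by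
        intro x
        rw [PySem.Dict.getD_modify]
        by_cases hx : x = c
        · subst hx; rw [if_pos rfl, hval x]
          simp [List.count_cons_self]
        · rw [if_neg hx, hval x]
          simp [Ne.symm hx]
      by_cases hct : c ∈ t
      · -- no deletion: count of c in the remainder is still positive
        have hcz : ¬ ((d.modify c 0 (· - 1)).getD c 0 = 0) := by
          rw [hval1 c]
          have := List.count_pos_iff.mpr hct
          omega
        have hmem2 : ∀ x, x ∈ (d.modify c 0 (· - 1)).keys ↔ x ∈ t := by
          intro x
          rw [hkeys1, hmem x]
          constructor
          · intro hx
            rcases List.mem_cons.mp hx with h | h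
            · subst h; exact hct
            · exact h
          · intro hx; exact List.mem_cons_of_mem _ hx
        have hsz : ((d.modify c 0 (· - 1)).size : Int)
            = ((PySem.Set.ofList t).length : Int) := by
          rw [pv_size_eq]
          norm_cast
          exact pv_len_congr (hkeys1 ▸ hnd) (PySem.Set.nodup_ofList t)
            (fun x => (hmem2 x).trans (PySem.Set.mem_ofList (y := x) (xs := t)).symm)
        simp only [List.foldl_cons, numSplitsStep, if_neg hcz, hsz]
        rw [ih _ _ _ (hkeys1 ▸ hnd) hmem2 hval1]
        simp only [List.length_cons]
        rw [List.range_succ_eq_map]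
        simp only [List.map_cons, List.map_map, List.sum_cons, Function.comp_def]
        simp only [Nat.succ_eq_add_one, List.take_succ_cons, List.drop_succ_cons,
          PySem.Set.update_cons, PySem.Set.update_nil, List.take_zero, List.drop_zero,
          PySem.Set.len]
        split_ifs <;> simp [add_assoc]
      · -- deletion: c exhausted, right[c] hits 0 and the key is removed
        have hcz : (d.modify c 0 (· - 1)).getD c 0 = 0 := by
          rw [hval1 c]
          simp [List.count_eq_zero_of_not_mem hct]
        set d2 := (d.modify c 0 (· - 1)).erase c with hd2
        have hkeys2 : d2.keys = d.keys.filter (fun x => !(x == c)) := by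
          rw [hd2, pv_keys_erase, hkeys1]
        have hnd2 : d2.keys.Nodup := by rw [hkeys2]; exact hnd.filter _
        have hmem2 : ∀ x, x ∈ d2.keys ↔ x ∈ t := by
          intro x
          rw [hkeys2]
          simp only [List.mem_filter, hmem x, List.mem_cons, Bool.not_eq_eq_eq_not,
            Bool.not_true, beq_eq_false_iff_ne, ne_eq]
          constructor
          · rintro ⟨h | h, hne⟩
            · exact absurd h hne
            · exact h
          · intro hx
            refine ⟨Or.inr hx, ?_⟩
            intro he; subst he; exact hct hx
        have hval2 : ∀ x, d2.getD x 0 = (t.count x : Int) := by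
          intro x
          by_cases hx : x = c
          · subst hx
            rw [PySem.Dict.getD_eq_get?_getD, hd2, pv_get?_erase_self]
            simp [List.count_eq_zero_of_not_mem hct]
          · rw [PySem.Dict.getD_eq_get?_getD, hd2, pv_get?_erase_ne _ _ _ hx,
              ← PySem.Dict.getD_eq_get?_getD, hval1 x]
        have hsz : (d2.size : Int) = ((PySem.Set.ofList t).length : Int) := by
          rw [pv_size_eq]
          norm_cast
          exact pv_len_congr hnd2 (PySem.Set.nodup_ofList t)
            (fun x => (hmem2 x).trans (PySem.Set.mem_ofList (y := x) (xs := t)).symm)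
        simp only [List.foldl_cons, numSplitsStep, if_pos hcz, ← hd2, hsz]
        rw [ih _ _ _ hnd2 hmem2 hval2]
        simp only [List.length_cons]
        rw [List.range_succ_eq_map]
        simp only [List.map_cons, List.map_map, List.sum_cons, Function.comp_def]
        simp only [Nat.succ_eq_add_one, List.take_succ_cons, List.drop_succ_cons,
          PySem.Set.update_cons, PySem.Set.update_nil, List.take_zero, List.drop_zero,
          PySem.Set.len]
        split_ifs <;> simp [add_assoc]

-- the suffix table of B, element by element
theorem pv_suf (l : List Char) :
    PySem.List.slice ((scanDistinct l.reverse).reverse ++ [(0 : Int)]) (some 1) none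
      = (List.range l.length).map
          (fun i => ((PySem.Set.ofList (l.drop (i+1))).length : Int)) := by
  rw [PySem.List.slice_from_one, scanDistinct_eq]
  apply List.ext_getElem
  · simp
  · intro i h1 h2
    simp only [List.length_tail, List.length_append, List.length_map, List.length_range,
      List.length_reverse] at h1
    have hn : i < l.length := by simpa using h2
    rw [List.getElem_tail]
    by_cases hi : i + 1 < l.reverse.length
    · rw [List.getElem_append_left (by simpa using hi)]
      rw [List.getElem_reverse, List.getElem_map, List.getElem_range, List.getElem_map,
        List.getElem_range]
      have hlen : l.reverse.length = l.length := List.length_reverse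
      have harg : (List.map (fun i => ((PySem.Set.ofList (l.reverse.take (i+1))).length : Int))
          (List.range l.reverse.length)).length - 1 - (i + 1) + 1 = l.length - (i + 1) := by
        simp only [List.length_map, List.length_range, hlen]
        omega
      rw [harg, List.take_reverse]
      have hdrop : l.length - (l.length - (i + 1)) = i + 1 := by
        rw [List.length_reverse] at hi
        omega
      rw [hdrop]
      norm_cast
      exact pv_len_congr (PySem.Set.nodup_ofList _) (PySem.Set.nodup_ofList _)
        (by intro x; simp [PySem.Set.mem_ofList])
    · have hieq : i + 1 = l.length := by
        rw [List.length_reverse] at hi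
        omega
      rw [List.getElem_append_right (by simpa using hi)]
      simp [hieq]

-- ===== VERDICT (by name: the statement is the Claim_ definition above) =====
theorem numSplits_spec : Claim_equal_numSplits := by
  intro s _
  unfold Spec_numSplits numSplits numSplits_alt
  rw [pv_afold s.toList _ _ _ (PySem.Dict.nodup_keys_counter _)
        (by simp [PySem.Dict.keys_counter, PySem.Set.mem_ofList])
        (fun x => PySem.Dict.getD_counter _ _)]
  simp only [pv_suf]
  simp only [scanDistinct_eq, zero_add]
  rw [List.zip_map', List.countP_map, ← PySem.List.sum_map_ite_one_zero]
  simp [beq_iff_eq, PySem.Set.update_nil_left]
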